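-- pv_equiv track=rewrite | github.com/aalacy/storelocatore-scrapers | apify/azambd/storelocator/arcosafety_ie/scrape.py | getHoo
-- ===== SOURCE A (Python) =====
-- MISSING = "<MISSING>"
--
-- def getHoo(texts):
--     isStore = False
--     hoo = ""
--     for text in texts:
--         text = text.replace("\r", " ").replace("\n", " ").replace("\xa0", " ")
--         text = " ".join(text.split())
--         if isStore is False and "day" in text:
--             isStore = True
--             continue
--         if isStore is True and len(text.strip()) > 0:
--             hoo = hoo + text + " "
--
--     hoo = hoo.strip()
--     if len(hoo):
--         return hoo
--     return MISSING
-- ===== SOURCE B (Python) =====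
-- MISSING = "<MISSING>"
--
-- def getHoo(texts):
--     # Right-to-left single pass: collect the non-empty normalized texts (in
--     # reverse order); whenever a text containing 'day' is met, record how many
--     # were collected so far — that snapshot is exactly the texts to its right.
--     # Processing leftwards means the LAST snapshot belongs to the FIRST 'day'
--     # marker, which is what the task asks for.
--     best = None
--     suff = []
--     for t in reversed(texts):
--         n = " ".join(t.replace("\r", " ").replace("\n", " ").replace("\xa0", " ").split())
--         if "day" in n:
--             best = len(suff)
--         if n:
--             suff.append(n)
--     if best is None:
--         return MISSING
--     parts = suff[:best][::-1]
--     return " ".join(parts) if parts else MISSING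
-- ===== Notes on version B (the rewrite author's own statement) =====
-- stated objective: alternative
-- what changed: Replaces A's left-to-right flag-and-accumulate scan (boolean marker state, string concatenation with trailing spaces, final strip) by a single right-to-left pass that collects the non-empty normalized texts in reverse and snapshots the collection length at each 'day' marker, so the snapshot made at the leftmost marker wins and the answer is the join of that recorded suffix.
import Mathlib
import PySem

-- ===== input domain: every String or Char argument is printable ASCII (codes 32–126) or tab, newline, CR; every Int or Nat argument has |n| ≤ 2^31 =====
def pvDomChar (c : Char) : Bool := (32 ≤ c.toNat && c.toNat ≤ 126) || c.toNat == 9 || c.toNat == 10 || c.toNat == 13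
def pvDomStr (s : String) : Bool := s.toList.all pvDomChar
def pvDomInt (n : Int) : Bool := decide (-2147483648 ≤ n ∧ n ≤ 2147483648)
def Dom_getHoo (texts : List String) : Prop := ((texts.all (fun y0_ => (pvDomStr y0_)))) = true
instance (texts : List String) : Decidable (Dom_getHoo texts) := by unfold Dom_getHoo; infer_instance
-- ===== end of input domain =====

-- B replaces A's left-to-right flag-and-accumulate scan by a single right-to-left pass that
-- collects non-empty normalized texts and snapshots the count at each 'day' marker (last = leftmost
-- marker wins) — objective: alternative.

-- ===== PORT A =====
-- shared normalization: text.replace("\r"," ").replace("\n"," ").replace("\xa0"," "); " ".join(text.split())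
def normTx (t : String) : String :=
  PySem.Str.join " "
    (PySem.Str.split₀
      (PySem.Str.replace (PySem.Str.replace (PySem.Str.replace t "\r" " ") "\n" " ") "\u00A0" " "))

def getHooStep (st : Bool × String) (text : String) : Bool × String :=
  let t := normTx text
  if st.1 = false ∧ PySem.Str.isIn "day" t = true then (true, st.2)
  else if st.1 = true ∧ PySem.Str.len (PySem.Str.strip t) > 0 then (st.1, st.2 ++ t ++ " ")
  else st

def getHoo (texts : List String) : String :=
  let r := texts.foldl getHooStep (false, "")
  let hoo := PySem.Str.strip r.2
  if PySem.Str.len hoo > 0 then hoo else "<MISSING>"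

-- ===== PORT B =====
-- state: (snapshot length recorded at the last marker seen, non-empty normalized texts in reverse order)
def altStep (t : String) (st : Option Nat × List String) : Option Nat × List String :=
  let n := normTx t
  let best := if PySem.Str.isIn "day" n = true then some st.2.length else st.1
  let suff := if n ≠ "" then st.2 ++ [n] else st.2
  (best, suff)

def getHoo_alt (texts : List String) : String :=
  match texts.foldr altStep (none, []) with
  | (none, _) => "<MISSING>"
  | (some k, suff) =>
      let parts := (suff.take k).reverse
      if parts ≠ [] then PySem.Str.join " " parts else "<MISSING>"

-- ===== PRECONDITION & SPEC =====
def Spec_getHoo (texts : List String) (out : String) : Prop := out = getHoo_alt texts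
instance (texts : List String) (out : String) : Decidable (Spec_getHoo texts out) := by unfold Spec_getHoo; infer_instance

-- ===== CLAIM (what is proved, stated in full; the proofs are below) =====
def Claim_equal_getHoo : Prop := ∀ (texts : List String), Dom_getHoo texts → Spec_getHoo texts (getHoo texts)

-- ===== LEMMAS AND PROOFS =====

-- a string with no whitespace at either edge
def NoEdgeSpace (j : List Char) : Prop :=
  (∀ c, j.head? = some c → PySem.Chars.isspace c = false) ∧
  (∀ c, j.getLast? = some c → PySem.Chars.isspace c = false)

theorem split₀_go_wf (rest : List Char) : ∀ (cur : List Char) (acc : List (List Char)),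
    (∀ w ∈ acc, w ≠ [] ∧ ∀ c ∈ w, PySem.Chars.isspace c = false) →
    (∀ c ∈ cur, PySem.Chars.isspace c = false) →
    ∀ w ∈ PySem.Chars.split₀.go rest cur acc, w ≠ [] ∧ ∀ c ∈ w, PySem.Chars.isspace c = false := by
  induction rest with
  | nil =>
    intro cur acc hacc hcur w hw
    rw [PySem.Chars.split₀.go] at hw
    by_cases hc : cur.isEmpty = true
    · simp [hc] at hw
      exact hacc w hw
    · simp [hc] at hw
      rcases hw with h | h
      · exact hacc w h
      · subst h
        exact ⟨by simpa [List.isEmpty_iff] using hc, fun c' h' => hcur c' (by simpa using h')⟩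
  | cons c rest ih =>
    intro cur acc hacc hcur w hw
    rw [PySem.Chars.split₀.go] at hw
    by_cases hs : PySem.Chars.isspace c = true
    · by_cases hc : cur.isEmpty = true
      · simp [hs, hc] at hw
        exact ih [] acc hacc (by simp) w hw
      · simp [hs, hc] at hw
        refine ih [] (cur.reverse :: acc) ?_ (by simp) w hw
        intro w' hw'
        rw [List.mem_cons] at hw'
        rcases hw' with h | h
        · subst h
          exact ⟨by simpa [List.isEmpty_iff] using hc, fun c' h' => hcur c' (by simpa using h')⟩
        · exact hacc w' h
    · simp [hs] at hw
      refine ih (c :: cur) acc hacc ?_ w hw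
      intro c' h'
      rw [List.mem_cons] at h'
      rcases h' with h' | h'
      · subst h'
        simpa using hs
      · exact hcur c' h'

theorem split₀_wf (s : List Char) :
    ∀ w ∈ PySem.Chars.split₀ s, w ≠ [] ∧ ∀ c ∈ w, PySem.Chars.isspace c = false := by
  exact split₀_go_wf s [] [] (by simp) (by simp)

theorem join_ne_nil (parts : List (List Char)) (hne : parts ≠ [])
    (h : ∀ w ∈ parts, w ≠ []) : PySem.Chars.join [' '] parts ≠ [] := by
  cases parts with
  | nil => exact absurd rfl hne
  | cons p ps =>
    cases ps with
    | nil => rw [PySem.Chars.join_singleton]; exact h p (by simp)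
    | cons q qs =>
      rw [PySem.Chars.join_cons_cons]
      simp [h p (by simp)]

theorem join_noEdge (parts : List (List Char))
    (h : ∀ w ∈ parts, w ≠ [] ∧ NoEdgeSpace w) :
    NoEdgeSpace (PySem.Chars.join [' '] parts) := by
  induction parts with
  | nil => exact ⟨by simp [PySem.Chars.join_nil], by simp [PySem.Chars.join_nil]⟩
  | cons p ps ih =>
    cases ps with
    | nil =>
      rw [PySem.Chars.join_singleton]
      exact (h p (by simp)).2
    | cons q qs =>
      rw [PySem.Chars.join_cons_cons]
      obtain ⟨hpne, hpE⟩ := h p (by simp)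
      have hih := ih (fun w hw => h w (List.mem_cons_of_mem _ hw))
      have hjne : PySem.Chars.join [' '] (q :: qs) ≠ [] :=
        join_ne_nil _ (by simp) (fun w hw => (h w (List.mem_cons_of_mem _ hw)).1)
      obtain ⟨d, t, hpd⟩ : ∃ d t, p = d :: t := by
        cases p with
        | nil => exact absurd rfl hpne
        | cons d t => exact ⟨d, t, rfl⟩
      constructor
      · intro c hc
        rw [hpd] at hc
        simp at hc
        exact hpE.1 c (by rw [hpd, hc.symm]; rfl)
      · intro c hc
        rw [List.append_assoc, List.getLast?_append_of_ne_nil _ (by simp),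
            List.getLast?_append_of_ne_nil _ hjne] at hc
        exact hih.2 c hc

theorem strip_eq_self (j : List Char) (h : NoEdgeSpace j) : PySem.Chars.strip j = j := by
  unfold PySem.Chars.strip PySem.Chars.lstrip PySem.Chars.rstrip
  cases hj : j with
  | nil => simp
  | cons d t =>
    have hd : PySem.Chars.isspace d = false := h.1 d (by rw [hj]; rfl)
    rw [List.dropWhile_cons, hd]
    rw [if_neg (by simp)]
    obtain ⟨e, hr⟩ : ∃ e, (d :: t).reverse.head? = some e := by
      rw [List.head?_reverse]
      exact ⟨(d::t).getLast (by simp), List.getLast?_eq_some_getLast (by simp)⟩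
    have he : PySem.Chars.isspace e = false := by
      apply h.2 e
      rw [hj]
      rw [List.head?_reverse] at hr
      exact hr
    obtain ⟨rt, hrt⟩ := List.head?_eq_some_iff.mp hr
    rw [hrt, List.dropWhile_cons, he]
    rw [if_neg (by simp)]
    rw [← hrt, List.reverse_reverse]

theorem strip_append_space (j : List Char) (h : NoEdgeSpace j) :
    PySem.Chars.strip (j ++ [' ']) = j := by
  unfold PySem.Chars.strip PySem.Chars.lstrip PySem.Chars.rstrip
  cases hj : j with
  | nil => simp [PySem.Chars.isspace]
  | cons d t =>
    have hd : PySem.Chars.isspace d = false := h.1 d (by rw [hj]; rfl)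
    rw [List.cons_append, List.dropWhile_cons, hd]
    rw [if_neg (by simp)]
    rw [← List.cons_append, List.reverse_append]
    simp only [List.reverse_singleton, List.singleton_append, List.dropWhile_cons]
    rw [if_pos (by simp [PySem.Chars.isspace])]
    obtain ⟨e, hr⟩ : ∃ e, (d :: t).reverse.head? = some e := by
      rw [List.head?_reverse]
      exact ⟨(d::t).getLast (by simp), List.getLast?_eq_some_getLast (by simp)⟩
    have he : PySem.Chars.isspace e = false := by
      apply h.2 e
      rw [hj]
      rw [List.head?_reverse] at hr
      exact hr
    obtain ⟨rt, hrt⟩ := List.head?_eq_some_iff.mp hr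
    rw [hrt, List.dropWhile_cons, he]
    rw [if_neg (by simp)]
    rw [← hrt, List.reverse_reverse]

theorem norm_toList (t : String) :
    (normTx t).toList =
      PySem.Chars.join [' ']
        (PySem.Chars.split₀
          (PySem.Chars.replace
            (PySem.Chars.replace (PySem.Chars.replace t.toList "\r".toList " ".toList)
              "\n".toList " ".toList) "\u00A0".toList " ".toList)) := by
  unfold normTx
  rw [PySem.Str.toList_join, PySem.Str.split₀_map_toList]
  rw [PySem.Str.toList_replace, PySem.Str.toList_replace, PySem.Str.toList_replace]
  have hsp : " ".toList = [' '] := by decide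
  rw [hsp]

theorem norm_noEdge (t : String) : NoEdgeSpace (normTx t).toList := by
  rw [norm_toList]
  apply join_noEdge
  intro w hw
  obtain ⟨h1, h2⟩ := split₀_wf _ w hw
  refine ⟨h1, fun c hc => h2 c (List.mem_of_mem_head? hc), fun c hc => h2 c (List.mem_of_getLast? hc)⟩

theorem strip_norm (t : String) : PySem.Str.strip (normTx t) = normTx t := by
  unfold PySem.Str.strip
  rw [strip_eq_self _ (norm_noEdge t)]
  simp

-- the characters A accumulates after the marker: each nonempty normalized text followed by ' '
def tailChars (ts : List String) : List Char :=
  ((ts.map (fun t => (normTx t).toList)).filter (fun w => decide (w ≠ []))).flatMap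
    (fun w => w ++ [' '])

theorem len_pos_iff (s : String) : PySem.Str.len s > 0 ↔ s.toList ≠ [] := by
  unfold PySem.Str.len
  constructor
  · intro h hnil
    rw [hnil] at h
    simp at h
  · intro h
    have : s.toList.length ≠ 0 := by simpa using h
    omega

theorem loop_true (ts : List String) : ∀ (h : String),
    (ts.foldl getHooStep (true, h)).1 = true ∧
    (ts.foldl getHooStep (true, h)).2.toList = h.toList ++ tailChars ts := by
  induction ts with
  | nil => intro h; simp [tailChars]
  | cons t ts ih =>
    intro h
    have hstep : getHooStep (true, h) t =
        if (normTx t).toList ≠ [] then (true, h ++ normTx t ++ " ") else (true, h) := by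
      unfold getHooStep
      rw [if_neg (by simp)]
      rw [strip_norm]
      by_cases hne : (normTx t).toList ≠ []
      · rw [if_pos ⟨rfl, (len_pos_iff _).mpr hne⟩, if_pos hne]
      · rw [if_neg (by rintro ⟨-, hlen⟩; exact hne ((len_pos_iff _).mp hlen)), if_neg hne]
    rw [List.foldl_cons, hstep]
    by_cases hne : (normTx t).toList ≠ []
    · rw [if_pos hne]
      obtain ⟨g1, g2⟩ := ih (h ++ normTx t ++ " ")
      refine ⟨g1, ?_⟩
      rw [g2]
      have : tailChars (t :: ts) = (normTx t).toList ++ [' '] ++ tailChars ts := by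
        unfold tailChars
        rw [List.map_cons, List.filter_cons, if_pos (by simpa using hne)]
        simp
      rw [this]
      simp
    · rw [if_neg hne]
      obtain ⟨g1, g2⟩ := ih h
      refine ⟨g1, ?_⟩
      rw [g2]
      have : tailChars (t :: ts) = tailChars ts := by
        unfold tailChars
        rw [List.map_cons, List.filter_cons, if_neg (by simpa using hne)]
      rw [this]

theorem flatMap_trail (ws : List (List Char)) :
    ws.flatMap (fun w => w ++ [' ']) =
      if ws.isEmpty then [] else PySem.Chars.join [' '] ws ++ [' '] := by
  induction ws with
  | nil => simp
  | cons w ws ih =>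
    rw [List.flatMap_cons, ih]
    cases ws with
    | nil => simp [PySem.Chars.join_singleton]
    | cons q qs =>
      rw [PySem.Chars.join_cons_cons]
      simp

theorem tailChars_eq (ts : List String) :
    tailChars ts =
      (((ts.map normTx).filter (fun t => decide (t ≠ ""))).map String.toList).flatMap
        (fun w => w ++ [' ']) := by
  induction ts with
  | nil => rfl
  | cons t ts ih =>
    unfold tailChars at ih ⊢
    simp only [List.map_cons, List.filter_cons]
    by_cases h : normTx t = ""
    · rw [if_neg (by simp [h]), if_neg (by simp [h])]
      exact ih
    · rw [if_pos (by simp [String.toList_eq_nil_iff, h]), if_pos (by simp [h])]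
      rw [List.flatMap_cons, List.map_cons, List.flatMap_cons, ih]

theorem after_marker (ts : List String) :
    (let r := ts.foldl getHooStep (true, "")
     let hoo := PySem.Str.strip r.2
     if PySem.Str.len hoo > 0 then hoo else "<MISSING>") =
    (let parts := (ts.map normTx).filter (fun t => decide (t ≠ ""))
     if parts.isEmpty then "<MISSING>" else PySem.Str.join " " parts) := by
  obtain ⟨-, h2⟩ := loop_true ts ""
  simp only []
  set ps := (ts.map normTx).filter (fun t => decide (t ≠ "")) with hps
  have hchars : (ts.foldl getHooStep (true, "")).2.toList =
      (ps.map String.toList).flatMap (fun w => w ++ [' ']) := by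
    rw [h2, tailChars_eq, ← hps]
    rfl
  have hwf : ∀ w ∈ ps.map String.toList, w ≠ [] ∧ NoEdgeSpace w := by
    intro w hw
    rw [List.mem_map] at hw
    obtain ⟨t, ht, rfl⟩ := hw
    rw [hps, List.mem_filter] at ht
    obtain ⟨htm, htne⟩ := ht
    rw [List.mem_map] at htm
    obtain ⟨u, -, rfl⟩ := htm
    exact ⟨by simpa [String.toList_eq_nil_iff] using htne, norm_noEdge u⟩
  by_cases hemp : ps.isEmpty
  · have hpsnil : ps = [] := by simpa [List.isEmpty_iff] using hemp
    have : PySem.Str.strip (ts.foldl getHooStep (true, "")).2 = "" := by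
      unfold PySem.Str.strip
      rw [hchars, hpsnil]
      simp [PySem.Chars.strip, PySem.Chars.lstrip, PySem.Chars.rstrip]
    rw [this, if_pos hemp, if_neg (by simp [PySem.Str.len])]
  · have hpsne : ps ≠ [] := by simpa [List.isEmpty_iff] using hemp
    have hjoinE : NoEdgeSpace (PySem.Chars.join [' '] (ps.map String.toList)) :=
      join_noEdge _ hwf
    have hjne : PySem.Chars.join [' '] (ps.map String.toList) ≠ [] :=
      join_ne_nil _ (by simpa using hpsne) (fun w hw => (hwf w hw).1)
    have hstrip : PySem.Str.strip (ts.foldl getHooStep (true, "")).2 =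
        PySem.Str.join " " ps := by
      unfold PySem.Str.strip PySem.Str.join
      rw [hchars, flatMap_trail, if_neg (by simpa [List.isEmpty_iff] using hpsne)]
      rw [strip_append_space _ hjoinE]
      have hsp : " ".toList = [' '] := by decide
      rw [hsp]
    rw [hstrip, if_neg hemp, if_pos]
    rw [len_pos_iff]
    unfold PySem.Str.join
    simpa using (by simpa using hjne : PySem.Chars.join " ".toList (ps.map String.toList) ≠ [])

-- B-side lemmas: the components of B's step, and string-level facts about the space-join
theorem altStep_fst (t : String) (st : Option Nat × List String) :
    (altStep t st).1 =
      if PySem.Str.isIn "day" (normTx t) = true then some st.2.length else st.1 := by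
  unfold altStep
  simp

theorem altStep_snd (t : String) (st : Option Nat × List String) :
    (altStep t st).2 = if normTx t ≠ "" then st.2 ++ [normTx t] else st.2 := by
  unfold altStep
  simp

theorem altStep_eq (t : String) (st : Option Nat × List String) :
    altStep t st =
      (if PySem.Str.isIn "day" (normTx t) = true then some st.2.length else st.1,
       if normTx t ≠ "" then st.2 ++ [normTx t] else st.2) := by
  rw [← Prod.mk.eta (p := altStep t st), altStep_fst, altStep_snd]

theorem str_join_ne (ps : List String) (hne : ps ≠ []) (h : ∀ p ∈ ps, p ≠ "") :
    PySem.Str.join " " ps ≠ "" := by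
  intro hc
  have hl := congrArg String.toList hc
  unfold PySem.Str.join at hl
  have hsp : " ".toList = [' '] := by decide
  rw [hsp] at hl
  simp only [String.toList_ofList] at hl
  refine join_ne_nil (ps.map String.toList) (by simpa using hne) ?_ (by simpa using hl)
  intro w hw
  rw [List.mem_map] at hw
  obtain ⟨p, hp, rfl⟩ := hw
  simpa [String.toList_eq_nil_iff] using h p hp

theorem filter_mem_ne (ts : List String) :
    ∀ p ∈ (ts.map normTx).filter (fun u => decide (u ≠ "")), p ≠ "" := by
  intro p hpmem
  simpa using List.of_mem_filter (p := fun u => decide (u ≠ "")) hpmem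

-- the list component of B's right fold: the non-empty normalized texts, in reverse order
theorem foldr_suffix (ts : List String) :
    (ts.foldr altStep (none, [])).2 =
      ((ts.map normTx).filter (fun t => decide (t ≠ ""))).reverse := by
  induction ts with
  | nil => rfl
  | cons t ts ih =>
    rw [List.foldr_cons, altStep_snd, ih]
    simp only [List.map_cons, List.filter_cons]
    by_cases hn : normTx t = ""
    · rw [if_neg (by simpa using hn), if_neg (by simp [hn])]
    · rw [if_pos (show normTx t ≠ "" from hn),
          if_pos (show decide (normTx t ≠ "") = true by simp [hn]), List.reverse_cons]

-- any recorded snapshot length is within the (only growing) suffix list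
theorem foldr_best_le (ts : List String) :
    ∀ k, (ts.foldr altStep (none, [])).1 = some k → k ≤ (ts.foldr altStep (none, [])).2.length := by
  induction ts with
  | nil => intro k hk; cases hk
  | cons t ts ih =>
    intro k hk
    rw [List.foldr_cons, altStep_fst] at hk
    rw [List.foldr_cons, altStep_snd]
    have hgrow : (ts.foldr altStep (none, [])).2.length ≤
        (if normTx t ≠ "" then (ts.foldr altStep (none, [])).2 ++ [normTx t]
         else (ts.foldr altStep (none, [])).2).length := by
      split_ifs <;> simp
    by_cases hday : PySem.Str.isIn "day" (normTx t) = true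
    · rw [if_pos hday] at hk
      simp only [Option.some.injEq] at hk
      exact hk ▸ hgrow
    · rw [if_neg hday] at hk
      exact le_trans (ih k hk) hgrow

theorem getHoo_eq_alt (texts : List String) : getHoo texts = getHoo_alt texts := by
  induction texts with
  | nil =>
    unfold getHoo getHoo_alt
    simp [PySem.Str.strip, PySem.Chars.strip, PySem.Chars.lstrip,
      PySem.Chars.rstrip, PySem.Str.len]
  | cons t ts ih =>
    by_cases hday : PySem.Str.isIn "day" (normTx t) = true
    · -- marker: A accumulates the rest; B snapshots the current suffix length here
      have hstep : getHooStep (false, "") t = (true, "") := by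
        unfold getHooStep
        rw [if_pos ⟨rfl, hday⟩]
      have hA : getHoo (t :: ts) =
          (let parts := (ts.map normTx).filter (fun u => decide (u ≠ ""))
           if parts.isEmpty then "<MISSING>" else PySem.Str.join " " parts) := by
        unfold getHoo
        rw [List.foldl_cons, hstep]
        exact after_marker ts
      have hsc : altStep t (ts.foldr altStep (none, [])) =
          (some (ts.foldr altStep (none, [])).2.length,
           if normTx t ≠ "" then (ts.foldr altStep (none, [])).2 ++ [normTx t]
           else (ts.foldr altStep (none, [])).2) := by
        rw [altStep_eq, if_pos hday]
      have hB : getHoo_alt (t :: ts) =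
          (let parts := (ts.map normTx).filter (fun u => decide (u ≠ ""))
           if parts.isEmpty then "<MISSING>" else PySem.Str.join " " parts) := by
        unfold getHoo_alt
        rw [List.foldr_cons, hsc, foldr_suffix]
        simp only []
        set ps := (ts.map normTx).filter (fun u => decide (u ≠ "")) with hps
        have htake : (if normTx t ≠ "" then ps.reverse ++ [normTx t] else ps.reverse).take
            ps.reverse.length = ps.reverse := by
          split_ifs
          · exact List.take_left
          · exact List.take_length
        simp only [htake, List.reverse_reverse]
        by_cases hp : ps = []
        · simp [hp]
        · have hne := str_join_ne ps hp (by rw [hps]; exact filter_mem_ne ts)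
          simp [hp, List.isEmpty_iff]
      rw [hA, hB]
    · -- no marker: both reduce to the tail
      have hstep : getHooStep (false, "") t = (false, "") := by
        unfold getHooStep
        rw [if_neg (by rintro ⟨-, h⟩; exact hday h)]
        rw [if_neg (by rintro ⟨h, -⟩; exact Bool.false_ne_true h)]
      have hL : getHoo (t :: ts) = getHoo ts := by
        unfold getHoo
        rw [List.foldl_cons, hstep]
      have hR : getHoo_alt (t :: ts) = getHoo_alt ts := by
        have hle := foldr_best_le ts
        have hsc : altStep t (ts.foldr altStep (none, [])) =
            ((ts.foldr altStep (none, [])).1,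
             if normTx t ≠ "" then (ts.foldr altStep (none, [])).2 ++ [normTx t]
             else (ts.foldr altStep (none, [])).2) := by
          rw [altStep_eq, if_neg hday]
        unfold getHoo_alt
        rw [List.foldr_cons, hsc]
        cases hF : ts.foldr altStep (none, []) with
        | mk b sf =>
          rw [hF] at hle
          cases b with
          | none => rfl
          | some k =>
            have hk : k ≤ sf.length := hle k rfl
            have htake : (if normTx t ≠ "" then sf ++ [normTx t] else sf).take k = sf.take k := by
              split_ifs
              · exact List.take_append_of_le_length hk
              · rfl
            simp only [htake]
      rw [hL, hR, ih]

-- ===== VERDICT (by name: the statement is the Claim_ definition above) =====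
theorem getHoo_spec : Claim_equal_getHoo := by
  intro texts _
  unfold Spec_getHoo
  exact getHoo_eq_alt texts
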